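-- pv_equiv track=rewrite | github.com/sasha0090/algorithms | sprint1_nonfinals/final2.py | find_num_points
-- ===== SOURCE A (Python) =====
-- from typing import List, Tuple
--
-- def find_num_points(keys_push: int, field_keys: List[str]) -> int:
--     keys_set = set(field_keys)
--     keys_set.discard('.')
--     my_dict = {i: field_keys.count(i) for i in keys_set}
--     points = 0
--     for val in my_dict.values():
--         if val <= keys_push:
--             points += 1
--     return points
-- ===== SOURCE B (Python) =====
-- def find_num_points(keys_push, field_keys):
--     points = 0
--     prev = ''
--     run = 0
--     for key in sorted(field_keys):
--         if run and key == prev: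
--             run += 1
--         else:
--             if run and prev != '.' and run <= keys_push:
--                 points += 1
--             prev = key
--             run = 1
--     if run and prev != '.' and run <= keys_push:
--         points += 1
--     return points
-- ===== Notes on version B (the rewrite author's own statement) =====
-- stated objective: faster
-- what changed: Sorts a copy of field_keys and counts qualifying keys in one run-length scan over consecutive equal elements, instead of building a set and rescanning field_keys.count for every distinct key.
import Mathlib
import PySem

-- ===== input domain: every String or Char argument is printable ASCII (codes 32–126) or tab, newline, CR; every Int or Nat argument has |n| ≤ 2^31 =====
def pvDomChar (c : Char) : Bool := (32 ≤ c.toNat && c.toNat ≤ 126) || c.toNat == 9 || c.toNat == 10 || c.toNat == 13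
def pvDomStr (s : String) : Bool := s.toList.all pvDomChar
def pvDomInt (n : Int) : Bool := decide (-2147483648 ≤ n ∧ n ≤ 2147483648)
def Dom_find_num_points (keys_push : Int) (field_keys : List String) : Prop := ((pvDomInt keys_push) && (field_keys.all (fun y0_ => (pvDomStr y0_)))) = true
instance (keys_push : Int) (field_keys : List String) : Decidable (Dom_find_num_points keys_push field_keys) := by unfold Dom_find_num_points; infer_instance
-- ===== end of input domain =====

-- B sorts a copy of field_keys and counts qualifying keys in one run-length scan (objective: faster).

-- ===== PORT A =====
def find_num_points (keys_push : Int) (field_keys : List String) : Int :=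
  let keys_set := PySem.Set.discard (PySem.Set.ofList field_keys) "."
  let my_dict : PySem.Dict String Int :=
    keys_set.foldl (fun d i => d.insert i (PySem.List.count field_keys i : Int)) PySem.Dict.empty
  my_dict.values.foldl (fun points val => if val ≤ keys_push then points + 1 else points) 0

-- ===== PORT B =====
-- one iteration of B's for-loop over the sorted copy: state (points, prev, run)
def pvStep (keys_push : Int) (st : Int × String × Int) (key : String) : Int × String × Int :=
  if st.2.2 ≠ 0 ∧ key = st.2.1 then (st.1, st.2.1, st.2.2 + 1)
  else ((if st.2.2 ≠ 0 ∧ st.2.1 ≠ "." ∧ st.2.2 ≤ keys_push then st.1 + 1 else st.1), key, 1)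

-- B's trailing 'if run and prev != "." and run <= keys_push: points += 1'
def pvFlush (keys_push : Int) (st : Int × String × Int) : Int :=
  if st.2.2 ≠ 0 ∧ st.2.1 ≠ "." ∧ st.2.2 ≤ keys_push then st.1 + 1 else st.1

def find_num_points_alt (keys_push : Int) (field_keys : List String) : Int :=
  pvFlush keys_push
    ((PySem.List.sorted field_keys (fun x => x) false).foldl (pvStep keys_push) (0, "", 0))

-- ===== PRECONDITION & SPEC =====
def Spec_find_num_points (keys_push : Int) (field_keys : List String) (out : Int) : Prop := out = find_num_points_alt keys_push field_keys
instance (keys_push : Int) (field_keys : List String) (out : Int) : Decidable (Spec_find_num_points keys_push field_keys out) := by unfold Spec_find_num_points; infer_instance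

-- ===== CLAIM (what is proved, stated in full; the proofs are below) =====
def Claim_equal_find_num_points : Prop := ∀ (keys_push : Int) (field_keys : List String), Dom_find_num_points keys_push field_keys → Spec_find_num_points keys_push field_keys (find_num_points keys_push field_keys)

-- ===== LEMMAS AND PROOFS =====

-- the predicate both sides count: key ≠ '.' and its multiplicity in l is ≤ keys_push
def pvPred (keys_push : Int) (l : List String) (k : String) : Bool :=
  decide (k ≠ ".") && decide ((l.count k : Int) ≤ keys_push)

-- A reduces to countP over the deduplicated, '.'-discarded key list
theorem pvA_char (keys_push : Int) (field_keys : List String) :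
    find_num_points keys_push field_keys =
      (((PySem.Set.discard (PySem.Set.ofList field_keys) ".").countP
        (fun i => decide ((field_keys.count i : Int) ≤ keys_push)) : Nat) : Int) := by
  unfold find_num_points
  simp only [PySem.Dict.values]
  rw [PySem.Dict.items_foldl_insert_fresh _ (fun i => i) _ _
      (fun a _ => PySem.Dict.contains_empty a)
      (by simpa using PySem.Set.nodup_discard _ "." (PySem.Set.nodup_ofList field_keys))]
  simp [Function.comp_def, List.foldl_map, PySem.List.foldl_ite_add_one, PySem.List.count_eq]

-- absorbing a run: folding pvStep over replicate m k from a live run on k adds m to run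
theorem pvFoldl_replicate (keys_push : Int) (m : Nat) (points : Int) (k : String) (run : Int)
    (h : 0 < run) :
    List.foldl (pvStep keys_push) (points, k, run) (List.replicate m k)
      = (points, k, run + m) := by
  induction m generalizing run with
  | zero => simp
  | succ n ih =>
      rw [List.replicate_succ, List.foldl_cons]
      have hstep : pvStep keys_push (points, k, run) k = (points, k, run + 1) := by
        simp [pvStep, h.ne']
      rw [hstep, ih (run + 1) (by omega)]
      have : run + 1 + (n : Int) = run + ((n : Nat) + 1 : Nat) := by push_cast; ring
      rw [this]

-- sorted run structure: takeWhile is the full run, k never recurs after it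
theorem pvRun_struct (k : String) (rest : List String)
    (hs : (k :: rest).Pairwise (· ≤ ·)) :
    rest.takeWhile (fun x => x == k) = List.replicate (rest.count k) k ∧
      k ∉ rest.dropWhile (fun x => x == k) := by
  obtain ⟨hhead, htail⟩ := List.pairwise_cons.mp hs
  have hnot : k ∉ rest.dropWhile (fun x => x == k) := by
    intro hk
    cases hd : rest.dropWhile (fun x => x == k) with
    | nil => rw [hd] at hk; simp at hk
    | cons h t =>
      have h0 := List.head?_dropWhile_not (fun x => x == k) rest
      rw [hd] at h0
      simp at h0
      have hmemh : h ∈ rest := (List.dropWhile_sublist _).subset (by rw [hd]; simp)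
      have hkh : k < h := lt_of_le_of_ne (hhead h hmemh) (Ne.symm h0)
      have hpt : (h :: t).Pairwise (· ≤ ·) := hd ▸ htail.sublist (List.dropWhile_sublist _)
      rw [hd] at hk
      rcases List.mem_cons.mp hk with rfl | hkt
      · exact absurd rfl hkh.ne'
      · exact absurd (lt_of_lt_of_le hkh ((List.pairwise_cons.mp hpt).1 k hkt)) (lt_irrefl k)
  have htk : ∀ x ∈ rest.takeWhile (fun x => x == k), x = k := by
    intro x hx
    simpa using List.mem_takeWhile_imp hx
  have hrepl : rest.takeWhile (fun x => x == k)
      = List.replicate (rest.takeWhile (fun x => x == k)).length k :=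
    List.eq_replicate_of_mem htk
  have hlen : (rest.takeWhile (fun x => x == k)).length = rest.count k := by
    conv_rhs => rw [← List.takeWhile_append_dropWhile (p := fun x => x == k) (l := rest)]
    rw [List.count_append]
    have h1 : (rest.takeWhile (fun x => x == k)).count k
        = (rest.takeWhile (fun x => x == k)).length := by
      rw [hrepl]; simp
    have h2 : (rest.dropWhile (fun x => x == k)).count k = 0 :=
      List.count_eq_zero.mpr hnot
    omega
  exact ⟨by rw [← hlen]; exact hrepl, hnot⟩

-- main invariant of B's fold on a sorted list
theorem pvML (keys_push : Int) (n : Nat) :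
    ∀ (l : List String), l.length ≤ n → l.Pairwise (· ≤ ·) →
      ∀ (points : Int) (prev : String) (run : Int),
        (run = 0 ∨ (0 < run ∧ prev ∉ l)) →
        pvFlush keys_push (l.foldl (pvStep keys_push) (points, prev, run)) =
          (if run ≠ 0 ∧ prev ≠ "." ∧ run ≤ keys_push then points + 1 else points) +
            (((PySem.Set.ofList l).countP (pvPred keys_push l) : Nat) : Int) := by
  induction n with
  | zero =>
      intro l hl _ points prev run _
      have : l = [] := List.length_eq_zero_iff.mp (Nat.le_zero.mp hl)
      subst this
      simp [pvFlush, PySem.Set.ofList]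
  | succ n ih =>
      intro l hl hs points prev run hrun
      cases l with
      | nil => simp [pvFlush, PySem.Set.ofList]
      | cons key rest =>
        obtain ⟨htake, hnot⟩ := pvRun_struct key rest hs
        set m := rest.count key with hm
        set rest' := rest.dropWhile (fun x => x == key) with hr'
        have hsplit : rest = List.replicate m key ++ rest' := by
          conv_lhs => rw [← List.takeWhile_append_dropWhile (p := fun x => x == key) (l := rest)]
          rw [htake]
        -- the first step closes any live run (key ≠ prev) and opens a run on key
        have hstep : pvStep keys_push (points, prev, run) key
            = ((if run ≠ 0 ∧ prev ≠ "." ∧ run ≤ keys_push then points + 1 else points), key, 1) := by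
          rcases hrun with h0 | ⟨hpos, hmem⟩
          · subst h0; simp [pvStep]
          · have : key ≠ prev := fun h => hmem (h ▸ List.mem_cons_self)
            simp [pvStep, this]
        set pts' : Int := if run ≠ 0 ∧ prev ≠ "." ∧ run ≤ keys_push then points + 1 else points
          with hpts'
        have hrest'len : rest'.length ≤ n := by
          have h1 : rest'.length ≤ rest.length := List.length_dropWhile_le _ _
          have h2 : rest.length + 1 ≤ n + 1 := by simpa using hl
          omega
        have hrest's : rest'.Pairwise (· ≤ ·) :=
          ((List.pairwise_cons.mp hs).2).sublist (List.dropWhile_sublist _)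
        have hfold : (key :: rest).foldl (pvStep keys_push) (points, prev, run)
            = rest'.foldl (pvStep keys_push) (pts', key, 1 + (m : Int)) := by
          rw [List.foldl_cons, hstep]
          conv_lhs => rw [hsplit]
          rw [List.foldl_append, pvFoldl_replicate keys_push m pts' key 1 one_pos]
        rw [hfold, ih rest' hrest'len hrest's pts' key (1 + (m : Int))
              (Or.inr ⟨by positivity, hnot⟩)]
        -- now compare counting over (key :: rest) with counting over rest'
        have hcnt_key : (key :: rest).count key = m + 1 := by
          rw [hm]; simp [List.count_cons_self]
        have hcnt_rest' : ∀ x ∈ rest', (key :: rest).count x = rest'.count x := by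
          intro x hx
          have hxk : x ≠ key := fun h => hnot (h ▸ hx)
          rw [List.count_cons_of_ne (Ne.symm hxk)]
          conv_lhs => rw [hsplit]
          rw [List.count_append, List.count_replicate]
          simp [Ne.symm hxk]
        have hperm : (PySem.Set.discard (PySem.Set.ofList rest) key).Perm
            (PySem.Set.ofList rest') := by
          refine (List.perm_ext_iff_of_nodup
            (PySem.Set.nodup_discard _ _ (PySem.Set.nodup_ofList rest))
            (PySem.Set.nodup_ofList rest')).mpr ?_
          intro x
          rw [PySem.Set.mem_discard, PySem.Set.mem_ofList, PySem.Set.mem_ofList]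
          constructor
          · rintro ⟨hxr, hxk⟩
            rw [hsplit] at hxr
            rcases List.mem_append.mp hxr with hrep | h'
            · exact absurd (List.eq_of_mem_replicate hrep) hxk
            · exact h'
          · intro hx
            refine ⟨by rw [hsplit]; exact List.mem_append_right _ hx, fun h => hnot (h ▸ hx)⟩
        have hcongr : List.countP (pvPred keys_push (key :: rest)) (PySem.Set.ofList rest')
            = List.countP (pvPred keys_push rest') (PySem.Set.ofList rest') :=
          List.countP_congr (fun x hx => by
            simp [pvPred, hcnt_rest' x ((PySem.Set.mem_ofList _ _).mp hx)])
        have hcountP : ((PySem.Set.ofList (key :: rest)).countP (pvPred keys_push (key :: rest)))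
            = (PySem.Set.ofList rest').countP (pvPred keys_push rest')
              + (if pvPred keys_push (key :: rest) key then 1 else 0) := by
          rw [PySem.Set.ofList_cons, List.countP_cons,
              List.Perm.countP_eq _ hperm, hcongr]
        rw [hcountP]
        have hpk : (pvPred keys_push (key :: rest) key = true)
            ↔ (key ≠ "." ∧ 1 + (m : Int) ≤ keys_push) := by
          simp only [pvPred, hcnt_key, Bool.and_eq_true, decide_eq_true_eq]
          constructor <;> rintro ⟨h1, h2⟩ <;> exact ⟨h1, by push_cast at h2 ⊢; omega⟩
        have hpos1m : (1 + (m : Int) ≠ 0) := by omega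
        by_cases hc : key ≠ "." ∧ 1 + (m : Int) ≤ keys_push
        · rw [if_pos ⟨hpos1m, hc.1, hc.2⟩, if_pos (hpk.mpr hc)]
          push_cast; ring
        · rw [if_neg (fun h => hc ⟨h.2.1, h.2.2⟩),
              if_neg (fun h => hc (hpk.mp h))]
          push_cast; ring

-- B computes countP over the distinct keys of the sorted copy
theorem pvB_char (keys_push : Int) (field_keys : List String) :
    find_num_points_alt keys_push field_keys =
      (((PySem.Set.ofList (PySem.List.sorted field_keys (fun x => x) false)).countP
        (pvPred keys_push (PySem.List.sorted field_keys (fun x => x) false)) : Nat) : Int) := by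
  unfold find_num_points_alt
  set s := PySem.List.sorted field_keys (fun x => x) false with hsdef
  have hs : s.Pairwise (· ≤ ·) := by
    simpa using PySem.List.sorted_pairwise (xs := field_keys) (key := fun x => x)
  rw [pvML keys_push s.length s le_rfl hs 0 "" 0 (Or.inl rfl)]
  simp

-- ===== VERDICT (by name: the statement is the Claim_ definition above) =====
theorem find_num_points_spec : Claim_equal_find_num_points := by
  intro keys_push field_keys _
  show find_num_points keys_push field_keys = find_num_points_alt keys_push field_keys
  rw [pvA_char, pvB_char]
  set s := PySem.List.sorted field_keys (fun x => x) false with hsdef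
  have hperm : s.Perm field_keys := PySem.List.sorted_perm _ _ _
  have hcnt : ∀ x, s.count x = field_keys.count x := fun x => hperm.count_eq x
  -- split the '≠ "."' conjunct of pvPred as a filter, then match A's discarded set
  have hfilter : (PySem.Set.ofList s).countP (pvPred keys_push s)
      = ((PySem.Set.ofList s).filter (fun k => decide (k ≠ "."))).countP
          (fun i => decide ((field_keys.count i : Int) ≤ keys_push)) := by
    rw [List.countP_filter]
    refine List.countP_congr ?_
    intro x _
    simp [pvPred, hcnt x, Bool.and_comm]
  have hperm2 : ((PySem.Set.ofList s).filter (fun k => decide (k ≠ "."))).Perm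
      (PySem.Set.discard (PySem.Set.ofList field_keys) ".") := by
    refine (List.perm_ext_iff_of_nodup
      (List.Nodup.filter _ (PySem.Set.nodup_ofList s))
      (PySem.Set.nodup_discard _ _ (PySem.Set.nodup_ofList field_keys))).mpr ?_
    intro x
    rw [List.mem_filter, PySem.Set.mem_ofList, PySem.Set.mem_discard, PySem.Set.mem_ofList]
    constructor
    · rintro ⟨hx, hd⟩
      exact ⟨hperm.mem_iff.mp hx, by simpa using hd⟩
    · rintro ⟨hx, hd⟩
      exact ⟨hperm.mem_iff.mpr hx, by simpa using hd⟩
  rw [hfilter, List.Perm.countP_eq _ hperm2]
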